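-- pv_equiv track=rewrite | github.com/SyedZohaibTech/physical-ai-book | backend/embed_book.py | remove_frontmatter
-- ===== SOURCE A (Python) =====
-- def remove_frontmatter(content):
--     """
--     Remove YAML frontmatter from markdown content (lines between ---).
--     """
--     lines = content.split('\n')
--     frontmatter_started = False
--     frontmatter_ended = False
--     cleaned_lines = []
--
--     for line in lines:
--         if line.strip() == '---' and not frontmatter_started:
--             frontmatter_started = True
--             continue
--         elif line.strip() == '---' and frontmatter_started and not frontmatter_ended:
--             frontmatter_ended = True
--             continue
--
--         if not frontmatter_started or frontmatter_ended:
--             cleaned_lines.append(line)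
--
--     return '\n'.join(cleaned_lines)
-- ===== SOURCE B (Python) =====
-- def remove_frontmatter(content):
--     """
--     Remove YAML frontmatter from markdown content (lines between ---).
--     """
--     lines = content.split('\n')
--     i = next((k for k, l in enumerate(lines) if l.strip() == '---'), None)
--     if i is None:
--         kept = lines
--     else:
--         j = next((k for k, l in enumerate(lines[i + 1:]) if l.strip() == '---'), None)
--         kept = lines[:i] if j is None else lines[:i] + lines[i + 1 + j + 1:]
--     return '\n'.join(kept)
-- ===== Notes on version B (the rewrite author's own statement) =====
-- stated objective: simpler
-- what changed: Replaces A's per-line state machine (two boolean flags and an accumulator) with locating the indices of the first two frontmatter marker lines and returning the line list sliced around them.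
import Mathlib
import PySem

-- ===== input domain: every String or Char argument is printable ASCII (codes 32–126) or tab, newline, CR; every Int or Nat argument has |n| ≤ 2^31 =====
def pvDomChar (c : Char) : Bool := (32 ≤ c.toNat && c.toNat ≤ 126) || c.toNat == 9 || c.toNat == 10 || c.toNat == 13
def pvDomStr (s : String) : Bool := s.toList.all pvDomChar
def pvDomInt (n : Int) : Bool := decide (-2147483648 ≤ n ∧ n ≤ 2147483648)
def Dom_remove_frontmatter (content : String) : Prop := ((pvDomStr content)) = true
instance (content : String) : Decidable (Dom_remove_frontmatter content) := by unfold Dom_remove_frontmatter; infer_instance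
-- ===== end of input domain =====

-- B replaces A's per-line state-machine accumulation by locating the two '---' marker
-- indices and slicing the line list (objective: simpler decomposition, same cost).


-- ===== PORT A =====
-- the for-loop over lines with the two boolean flags and the accumulator
def removeFMLoop (lines : List String) (started ended : Bool) (acc : List String) : List String :=
  match lines with
  | [] => acc
  | l :: rest =>
    if PySem.Str.strip l == "---" && !started then
      removeFMLoop rest true ended acc
    else if PySem.Str.strip l == "---" && started && !ended then
      removeFMLoop rest started true acc
    else if !started || ended then
      removeFMLoop rest started ended (acc ++ [l])
    else
      removeFMLoop rest started ended acc

def remove_frontmatter (content : String) : String :=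
  PySem.Str.join "\n" (removeFMLoop ((PySem.Str.split? content "\n").getD []) false false [])

-- ===== PORT B =====
-- line is a frontmatter marker
def pvIsMarker (l : String) : Bool := PySem.Str.strip l == "---"

-- first marker index i; then first marker index j in lines[i+1:]; slice accordingly
def pvKept (lines : List String) : List String :=
  match lines.findIdx? pvIsMarker with
  | none => lines
  | some i =>
    match (lines.drop (i + 1)).findIdx? pvIsMarker with
    | none => lines.take i
    | some j => lines.take i ++ lines.drop (i + 1 + j + 1)

def remove_frontmatter_alt (content : String) : String :=
  PySem.Str.join "\n" (pvKept ((PySem.Str.split? content "\n").getD []))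

-- ===== PRECONDITION & SPEC =====
def Spec_remove_frontmatter (content : String) (out : String) : Prop := out = remove_frontmatter_alt content
instance (content : String) (out : String) : Decidable (Spec_remove_frontmatter content out) := by unfold Spec_remove_frontmatter; infer_instance

-- ===== CLAIM (what is proved, stated in full; the proofs are below) =====
def Claim_equal_remove_frontmatter : Prop := ∀ (content : String), Dom_remove_frontmatter content → Spec_remove_frontmatter content (remove_frontmatter content)

-- ===== LEMMAS AND PROOFS =====

-- after both markers were seen, every line is kept
theorem removeFMLoop_done (lines : List String) (acc : List String) :
    removeFMLoop lines true true acc = acc ++ lines := by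
  induction lines generalizing acc with
  | nil => simp [removeFMLoop]
  | cons l rest ih =>
    by_cases h : pvIsMarker l = true <;>
      simp [removeFMLoop, pvIsMarker] at h ⊢ <;> simp [h, ih]

-- inside the frontmatter: drop up to and including the next marker
theorem removeFMLoop_started (lines : List String) (acc : List String) :
    removeFMLoop lines true false acc
      = acc ++ (match lines.findIdx? pvIsMarker with
                | none => []
                | some j => lines.drop (j + 1)) := by
  induction lines generalizing acc with
  | nil => simp [removeFMLoop]
  | cons l rest ih =>
    by_cases h : pvIsMarker l = true
    · simp only [pvIsMarker] at h
      simp [removeFMLoop, h, removeFMLoop_done, List.findIdx?_cons,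
        pvIsMarker]
    · simp only [pvIsMarker] at h
      simp only [removeFMLoop, h, Bool.false_and, Bool.and_false, if_neg,
        Bool.not_true, Bool.false_or, Bool.true_and]
      rw [ih]
      simp [List.findIdx?_cons, pvIsMarker, h]
      cases rest.findIdx? pvIsMarker <;> simp

-- before any marker: A's loop produces exactly B's slice decomposition
theorem removeFMLoop_init (lines : List String) (acc : List String) :
    removeFMLoop lines false false acc = acc ++ pvKept lines := by
  induction lines generalizing acc with
  | nil => simp [removeFMLoop, pvKept]
  | cons l rest ih =>
    by_cases h : pvIsMarker l = true
    · simp only [pvIsMarker] at h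
      simp only [removeFMLoop, h, Bool.not_false, Bool.and_true, if_pos,
        beq_iff_eq]
      rw [removeFMLoop_started]
      simp [pvKept, List.findIdx?_cons, pvIsMarker, h]
      cases rest.findIdx? pvIsMarker <;> simp [Nat.add_comm]
    · simp only [pvIsMarker] at h
      simp only [removeFMLoop, h, Bool.false_and, if_neg, Bool.not_false,
        Bool.true_or, if_pos, Bool.and_false]
      rw [ih]
      simp only [pvKept, List.findIdx?_cons, pvIsMarker, h, if_neg,
        Option.map]
      cases hr : rest.findIdx? pvIsMarker with
      | none => simp [hr]
      | some i =>
        simp [hr]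
        cases (rest.drop (i + 1)).findIdx? pvIsMarker <;>
          simp [List.take_succ_cons, List.drop_succ_cons] <;> omega

-- ===== VERDICT (by name: the statement is the Claim_ definition above) =====
theorem remove_frontmatter_spec : Claim_equal_remove_frontmatter := by
  intro content _
  unfold Spec_remove_frontmatter remove_frontmatter remove_frontmatter_alt
  rw [removeFMLoop_init]
  simp
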